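-- pv_equiv track=rewrite | github.com/fooSynaptic/exam | Coding/LCS_string.py | lcs_string
-- ===== SOURCE A (Python) =====
-- def lcs_string(s1, s2):
--     l1, l2 = len(s1), len(s2)
--     dp = [['' for _ in range(l2+1)] for _ in range(l1+1)]
--     string = ''
--     for i in range(1, l1+1):
--         for j in range(1, l2+1):
--             dp[i][j] = max(dp[i-1][j], dp[i][j-1])
--             if s1[i-1] == s2[j-1]:
--                 dp[i][j] = max(dp[i][j], dp[i-1][j-1]+s1[i-1])
--             string = max(string, dp[i][j])
--     return string
-- ===== SOURCE B (Python) =====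
-- def lcs_string(s1, s2):
--     # Demand-driven evaluation: starting from the goal cell (len(s1), len(s2)),
--     # a work stack descends to whichever dependency is still unresolved, and a
--     # memo dict records each resolved cell; no table, no nested sweeps, no
--     # running maximum (the goal cell dominates every other cell).
--     memo = {}
--     stack = [(len(s1), len(s2))]
--     while stack:
--         i, j = stack[-1]
--         if i == 0 or j == 0:
--             stack.pop()
--             continue
--         need = [(i - 1, j), (i, j - 1)]
--         if s1[i - 1] == s2[j - 1]:
--             need.append((i - 1, j - 1))
--         pending = next((p for p in need
--                         if p[0] > 0 and p[1] > 0 and p not in memo), None)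
--         if pending is not None:
--             stack.append(pending)
--             continue
--         best = max(memo.get((i - 1, j), ''), memo.get((i, j - 1), ''))
--         if s1[i - 1] == s2[j - 1]:
--             best = max(best, memo.get((i - 1, j - 1), '') + s1[i - 1])
--         memo[(i, j)] = best
--         stack.pop()
--     return memo.get((len(s1), len(s2)), '')
-- ===== Notes on version B (the rewrite author's own statement) =====
-- stated objective: alternative
-- what changed: B replaces A's bottom-up nested sweep over a full (l1+1)x(l2+1) table with a running maximum by a goal-directed, demand-driven evaluation: an explicit work stack descends from the goal cell (l1,l2) to its first unresolved dependency, a memo dict keyed by (i,j) records each resolved cell, and the goal cell's value is returned directly (it dominates every cell, so A's running max is redundant).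
import Mathlib
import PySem

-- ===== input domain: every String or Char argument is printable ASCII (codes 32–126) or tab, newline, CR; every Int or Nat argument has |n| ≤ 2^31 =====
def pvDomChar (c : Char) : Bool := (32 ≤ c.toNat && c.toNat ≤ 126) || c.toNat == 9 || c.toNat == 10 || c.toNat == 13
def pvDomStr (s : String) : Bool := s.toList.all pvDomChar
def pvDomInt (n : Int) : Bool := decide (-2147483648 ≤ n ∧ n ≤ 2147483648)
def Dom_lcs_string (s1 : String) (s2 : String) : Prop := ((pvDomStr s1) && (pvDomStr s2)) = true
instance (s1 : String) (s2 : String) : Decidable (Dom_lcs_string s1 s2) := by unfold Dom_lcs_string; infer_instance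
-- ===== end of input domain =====

-- B replaces A's bottom-up nested sweep over a full table (with a running maximum)
-- by a goal-directed demand-driven evaluation: a work stack descends from the goal
-- cell to its first unresolved dependency, a memo dict records resolved cells, and
-- the goal cell's value is returned directly; equivalence is exact on all inputs.

-- ===== PORT A =====
-- Ported over `List Char` (the PySem route; Python's lexicographic string `max`
-- is `max` in the lexicographic order on `List Char`, identical on ASCII).
-- Loop variables i, j range over 1..l1 / 1..l2, so every index used
-- (i-1, j-1, i, j) is ≥ 0 and in range: `List.getD` / `List.set` compute
-- exactly what Python's indexing and item assignment do here.
def lcs_string (s1 : String) (s2 : String) : String :=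
  let cs1 := s1.toList
  let cs2 := s2.toList
  let l1 := cs1.length
  let l2 := cs2.length
  let dp0 := (List.range (l1+1)).map (fun _ => (List.range (l2+1)).map (fun _ => ([] : List Char)))
  let st := (List.range' 1 l1).foldl (fun (st : List (List (List Char)) × List Char) i =>
      (List.range' 1 l2).foldl (fun st j =>
        let dp := st.1
        let v0 := max ((dp.getD (i-1) []).getD j []) ((dp.getD i []).getD (j-1) [])
        let v := if cs1.getD (i-1) ' ' = cs2.getD (j-1) ' '
                 then max v0 ((dp.getD (i-1) []).getD (j-1) [] ++ [cs1.getD (i-1) ' '])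
                 else v0
        (dp.set i ((dp.getD i []).set j v), max st.2 v)) st)
    (dp0, ([] : List Char))
  String.ofList st.2

-- ===== PORT B =====
-- Transliteration of Source B's while-loop: the stack top (i, j) is popped when it is
-- a border cell; otherwise the first dependency that is positive and not yet in
-- the memo dict is pushed; otherwise the cell's value is computed from the memo
-- (missing border dependencies defaulting to '') and stored, and the cell popped.
-- The fuel argument only makes the loop total in Lean (the proofs show the loop
-- finishes within this fuel); Python's while-loop carries no fuel.
def pvLoopB (cs1 cs2 : List Char) :
    Nat → List (Nat × Nat) → PySem.Dict (Nat × Nat) (List Char) →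
    PySem.Dict (Nat × Nat) (List Char)
  | 0, _, memo => memo
  | _+1, [], memo => memo
  | fuel+1, (i, j) :: rest, memo =>
    if i = 0 ∨ j = 0 then
      pvLoopB cs1 cs2 fuel rest memo
    else
      match ((i-1, j) :: (i, j-1) ::
          (if cs1.getD (i-1) ' ' = cs2.getD (j-1) ' ' then [(i-1, j-1)] else [])).find?
          (fun p => decide (0 < p.1) && decide (0 < p.2) && (memo.get? p).isNone) with
      | some p => pvLoopB cs1 cs2 fuel (p :: (i, j) :: rest) memo
      | none =>
        pvLoopB cs1 cs2 fuel rest (memo.insert (i, j)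
          (if cs1.getD (i-1) ' ' = cs2.getD (j-1) ' '
           then max (max (memo.getD (i-1, j) []) (memo.getD (i, j-1) []))
                (memo.getD (i-1, j-1) [] ++ [cs1.getD (i-1) ' '])
           else max (memo.getD (i-1, j) []) (memo.getD (i, j-1) [])))

def lcs_string_alt (s1 : String) (s2 : String) : String :=
  let cs1 := s1.toList
  let cs2 := s2.toList
  let l1 := cs1.length
  let l2 := cs2.length
  let memo := pvLoopB cs1 cs2 (((l1+1)*(l2+1)+1)*(l1+l2+2)) [(l1, l2)] PySem.Dict.empty
  String.ofList (memo.getD (l1, l2) [])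

-- ===== PRECONDITION & SPEC =====
def Spec_lcs_string (s1 : String) (s2 : String) (out : String) : Prop := out = lcs_string_alt s1 s2
instance (s1 : String) (s2 : String) (out : String) : Decidable (Spec_lcs_string s1 s2 out) := by unfold Spec_lcs_string; infer_instance

-- ===== CLAIM (what is proved, stated in full; the proofs are below) =====
def Claim_equal_lcs_string : Prop := ∀ (s1 : String) (s2 : String), Dom_lcs_string s1 s2 → Spec_lcs_string s1 s2 (lcs_string s1 s2)

-- ===== LEMMAS AND PROOFS =====

def pvDp (cs1 cs2 : List Char) : Nat → Nat → List Char
  | 0, _ => []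
  | _+1, 0 => []
  | i+1, j+1 =>
    let m := max (pvDp cs1 cs2 i (j+1)) (pvDp cs1 cs2 (i+1) j)
    if cs1.getD i ' ' = cs2.getD j ' ' then max m (pvDp cs1 cs2 i j ++ [cs1.getD i ' ']) else m
  termination_by i j => (i, j)

theorem pvDp_zero_right (cs1 cs2 : List Char) (i : Nat) : pvDp cs1 cs2 i 0 = [] := by
  cases i <;> rw [pvDp]

theorem pvDp_zero_left (cs1 cs2 : List Char) (j : Nat) : pvDp cs1 cs2 0 j = [] := by
  rw [pvDp]

theorem pvDp_succ_succ (cs1 cs2 : List Char) (i j : Nat) :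
    pvDp cs1 cs2 (i+1) (j+1)
      = (if cs1.getD i ' ' = cs2.getD j ' '
         then max (max (pvDp cs1 cs2 i (j+1)) (pvDp cs1 cs2 (i+1) j)) (pvDp cs1 cs2 i j ++ [cs1.getD i ' '])
         else max (pvDp cs1 cs2 i (j+1)) (pvDp cs1 cs2 (i+1) j)) := by
  rw [pvDp]

theorem pv_nil_le (l : List Char) : ([] : List Char) ≤ l :=
  le_of_not_gt (fun h => List.not_lex_nil ((List.lt_iff_lex_lt _ _).mp h))

theorem pvDp_mono_j (cs1 cs2 : List Char) (i j : Nat) :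
    pvDp cs1 cs2 i j ≤ pvDp cs1 cs2 i (j+1) := by
  cases i with
  | zero => rw [pvDp_zero_left, pvDp_zero_left]
  | succ i =>
    cases j with
    | zero => rw [pvDp_zero_right]; exact pv_nil_le _
    | succ j =>
      rw [pvDp_succ_succ cs1 cs2 i (j+1)]
      split
      · exact le_trans (le_max_right _ _) (le_max_left _ _)
      · exact le_max_right _ _

theorem pvDp_mono_i (cs1 cs2 : List Char) (i j : Nat) :
    pvDp cs1 cs2 i j ≤ pvDp cs1 cs2 (i+1) j := by
  cases j with
  | zero => rw [pvDp_zero_right, pvDp_zero_right]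
  | succ j =>
    rw [pvDp_succ_succ cs1 cs2 i j]
    split
    · exact le_trans (le_max_left _ _) (le_max_left _ _)
    · exact le_max_left _ _

theorem pv_getD_rmap {α : Type} (n k : Nat) (f : Nat → α) (d : α) (h : k < n) :
    (((List.range n).map f).getD k d) = f k := by
  simp [List.getD, h]

theorem pv_set_rmap {α : Type} (n k : Nat) (f : Nat → α) (v : α) (_h : k < n) :
    ((List.range n).map f).set k v
      = (List.range n).map (fun x => if x = k then v else f x) := by
  apply List.ext_getElem
  · simp
  · intro m h1 h2
    simp only [List.getElem_set, List.getElem_map, List.getElem_range]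
    by_cases hm : m = k
    · simp [hm]
    · simp [hm]; intro h'; exact absurd h'.symm hm

def pvTbl (cs1 cs2 : List Char) (i j : Nat) : List (List (List Char)) :=
  (List.range (cs1.length+1)).map (fun x => (List.range (cs2.length+1)).map (fun y =>
    if x < i ∨ (x = i ∧ y ≤ j) then pvDp cs1 cs2 x y else []))

theorem pvTbl_getD (cs1 cs2 : List Char) (i j x y : Nat)
    (hx : x < cs1.length+1) (hy : y < cs2.length+1) :
    (((pvTbl cs1 cs2 i j).getD x []).getD y [])
      = if x < i ∨ (x = i ∧ y ≤ j) then pvDp cs1 cs2 x y else [] := by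
  unfold pvTbl
  rw [pv_getD_rmap _ _ _ _ hx, pv_getD_rmap _ _ _ _ hy]

theorem pvTbl_next (cs1 cs2 : List Char) (i j : Nat)
    (hi : i < cs1.length) (hj : j < cs2.length) :
    (pvTbl cs1 cs2 (i+1) j).set (i+1)
        ((((pvTbl cs1 cs2 (i+1) j).getD (i+1) [])).set (j+1) (pvDp cs1 cs2 (i+1) (j+1)))
      = pvTbl cs1 cs2 (i+1) (j+1) := by
  unfold pvTbl
  rw [pv_getD_rmap _ _ _ _ (by omega), pv_set_rmap _ _ _ _ (by omega),
      pv_set_rmap _ _ _ _ (by omega)]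
  apply List.map_congr_left
  intro x _
  by_cases hx : x = i+1
  · subst hx
    simp only [lt_irrefl, false_or, true_and]
    apply List.map_congr_left
    intro y _
    by_cases hy : y = j+1
    · subst hy; simp
    · simp only [if_neg hy]
      have : (y ≤ j) ↔ (y ≤ j+1) := by omega
      simp [this]
  · simp only [if_neg hx]
    apply List.map_congr_left
    intro y _
    have h1 : (x < i+1 ∨ (x = i+1 ∧ y ≤ j)) ↔ x < i+1 := by omega
    have h2 : (x < i+1 ∨ (x = i+1 ∧ y ≤ j+1)) ↔ x < i+1 := by omega
    simp only [h1, h2]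

theorem pvTbl_row_done (cs1 cs2 : List Char) (i : Nat) :
    pvTbl cs1 cs2 i cs2.length = pvTbl cs1 cs2 (i+1) 0 := by
  unfold pvTbl
  apply List.map_congr_left
  intro x _
  apply List.map_congr_left
  intro y hy
  simp only [List.mem_range] at hy
  by_cases hx1 : x < i
  · have h1 : (x < i ∨ (x = i ∧ y ≤ cs2.length)) := Or.inl hx1
    have h2 : (x < i+1 ∨ (x = i+1 ∧ y ≤ 0)) := Or.inl (by omega)
    rw [if_pos h1, if_pos h2]
  · by_cases hx2 : x = i
    · have h1 : (x < i ∨ (x = i ∧ y ≤ cs2.length)) := Or.inr ⟨hx2, by omega⟩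
      have h2 : (x < i+1 ∨ (x = i+1 ∧ y ≤ 0)) := Or.inl (by omega)
      rw [if_pos h1, if_pos h2]
    · by_cases hx3 : x = i+1
      · have h1 : ¬(x < i ∨ (x = i ∧ y ≤ cs2.length)) := by omega
        rw [if_neg h1]
        by_cases hy0 : y = 0
        · subst hy0 hx3; simp [pvDp_zero_right]
        · have h2 : ¬(x < i+1 ∨ (x = i+1 ∧ y ≤ 0)) := by omega
          rw [if_neg h2]
      · have h1 : ¬(x < i ∨ (x = i ∧ y ≤ cs2.length)) := by omega
        have h2 : ¬(x < i+1 ∨ (x = i+1 ∧ y ≤ 0)) := by omega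
        rw [if_neg h1, if_neg h2]

theorem pv_A_inner (cs1 cs2 : List Char) (i : Nat) (hi : i < cs1.length) :
    ∀ (n j : Nat) (s : List Char), j + n = cs2.length →
    (List.range' (j+1) n).foldl
      (fun (st : List (List (List Char)) × List Char) jj =>
        (st.1.set (i+1) ((st.1.getD (i+1) []).set jj
          (if cs1.getD i ' ' = cs2.getD (jj-1) ' '
           then max (max ((st.1.getD i []).getD jj []) ((st.1.getD (i+1) []).getD (jj-1) []))
                ((st.1.getD i []).getD (jj-1) [] ++ [cs1.getD i ' '])
           else max ((st.1.getD i []).getD jj []) ((st.1.getD (i+1) []).getD (jj-1) []))),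
         max st.2
          (if cs1.getD i ' ' = cs2.getD (jj-1) ' '
           then max (max ((st.1.getD i []).getD jj []) ((st.1.getD (i+1) []).getD (jj-1) []))
                ((st.1.getD i []).getD (jj-1) [] ++ [cs1.getD i ' '])
           else max ((st.1.getD i []).getD jj []) ((st.1.getD (i+1) []).getD (jj-1) []))))
      (pvTbl cs1 cs2 (i+1) j, max s (pvDp cs1 cs2 (i+1) j))
    = (pvTbl cs1 cs2 (i+1) cs2.length, max s (pvDp cs1 cs2 (i+1) cs2.length)) := by
  intro n
  induction n with
  | zero => intro j s hj; simp at hj; rw [hj]; rfl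
  | succ n ih =>
    intro j s hj
    rw [List.range'_succ, List.foldl_cons]
    have hjl : j < cs2.length := by omega
    have hread1 : ((pvTbl cs1 cs2 (i+1) j).getD i []).getD (j+1) [] = pvDp cs1 cs2 i (j+1) := by
      rw [pvTbl_getD _ _ _ _ _ _ (by omega) (by omega), if_pos]
      omega
    have hread2 : ((pvTbl cs1 cs2 (i+1) j).getD (i+1) []).getD j [] = pvDp cs1 cs2 (i+1) j := by
      rw [pvTbl_getD _ _ _ _ _ _ (by omega) (by omega), if_pos]
      omega
    have hread3 : ((pvTbl cs1 cs2 (i+1) j).getD i []).getD j [] = pvDp cs1 cs2 i j := by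
      rw [pvTbl_getD _ _ _ _ _ _ (by omega) (by omega), if_pos]
      omega
    simp only [Nat.add_sub_cancel, hread1, hread2, hread3]
    rw [← pvDp_succ_succ cs1 cs2 i j]
    rw [pvTbl_next cs1 cs2 i j hi hjl]
    rw [max_assoc, max_eq_right (pvDp_mono_j cs1 cs2 (i+1) j)]
    exact ih (j+1) s (by omega)

theorem pv_A_outer (cs1 cs2 : List Char) :
    ∀ (n i : Nat), i + n = cs1.length →
    (List.range' (i+1) n).foldl
      (fun (st : List (List (List Char)) × List Char) ii =>
        (List.range' 1 cs2.length).foldl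
          (fun (st : List (List (List Char)) × List Char) jj =>
            (st.1.set ii ((st.1.getD ii []).set jj
              (if cs1.getD (ii-1) ' ' = cs2.getD (jj-1) ' '
               then max (max ((st.1.getD (ii-1) []).getD jj []) ((st.1.getD ii []).getD (jj-1) []))
                    ((st.1.getD (ii-1) []).getD (jj-1) [] ++ [cs1.getD (ii-1) ' '])
               else max ((st.1.getD (ii-1) []).getD jj []) ((st.1.getD ii []).getD (jj-1) []))),
             max st.2
              (if cs1.getD (ii-1) ' ' = cs2.getD (jj-1) ' '
               then max (max ((st.1.getD (ii-1) []).getD jj []) ((st.1.getD ii []).getD (jj-1) []))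
                    ((st.1.getD (ii-1) []).getD (jj-1) [] ++ [cs1.getD (ii-1) ' '])
               else max ((st.1.getD (ii-1) []).getD jj []) ((st.1.getD ii []).getD (jj-1) [])))) st)
      (pvTbl cs1 cs2 i cs2.length, pvDp cs1 cs2 i cs2.length)
    = (pvTbl cs1 cs2 cs1.length cs2.length, pvDp cs1 cs2 cs1.length cs2.length) := by
  intro n
  induction n with
  | zero => intro i hi; simp at hi; rw [hi]; rfl
  | succ n ih =>
    intro i hi
    rw [List.range'_succ, List.foldl_cons]
    have hil : i < cs1.length := by omega
    have hstart :
        ((pvTbl cs1 cs2 i cs2.length, pvDp cs1 cs2 i cs2.length) :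
          List (List (List Char)) × List Char)
        = (pvTbl cs1 cs2 (i+1) 0, max (pvDp cs1 cs2 i cs2.length) (pvDp cs1 cs2 (i+1) 0)) := by
      rw [pvTbl_row_done, pvDp_zero_right, max_eq_left (pv_nil_le _)]
    rw [hstart]
    simp only [Nat.add_sub_cancel]
    have hinner := pv_A_inner cs1 cs2 i hil cs2.length 0 (pvDp cs1 cs2 i cs2.length) (by omega)
    simp only [Nat.zero_add] at hinner
    rw [hinner]
    rw [max_eq_right (pvDp_mono_i cs1 cs2 i cs2.length)]
    exact ih (i+1) (by omega)

theorem pv_A_eq (s1 s2 : String) :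
    lcs_string s1 s2 = String.ofList (pvDp s1.toList s2.toList s1.toList.length s2.toList.length) := by
  simp only [lcs_string]
  have hdp0 : (List.range (s1.toList.length+1)).map
        (fun _ => (List.range (s2.toList.length+1)).map (fun _ => ([] : List Char)))
      = pvTbl s1.toList s2.toList 0 s2.toList.length := by
    unfold pvTbl
    apply List.map_congr_left; intro x _
    apply List.map_congr_left; intro y _
    by_cases hx : x = 0
    · subst hx; simp [pvDp_zero_left]
    · have hc : ¬(x < 0 ∨ (x = 0 ∧ y ≤ s2.toList.length)) := by omega
      rw [if_neg hc]
  rw [hdp0]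
  have houter := pv_A_outer s1.toList s2.toList s1.toList.length 0 (by omega)
  simp only [Nat.zero_add] at houter
  rw [pvDp_zero_left s1.toList s2.toList s2.toList.length] at houter
  rw [houter]

-- ===== B-side proof: the stack loop resolves the goal cell to pvDp =====

def pvBoxL (l1 l2 : Nat) : List (Nat × Nat) :=
  (List.range (l1+1)).flatMap (fun x => (List.range (l2+1)).map (fun y => (x, y)))

theorem pv_mem_box (l1 l2 x y : Nat) (hx : x ≤ l1) (hy : y ≤ l2) :
    (x, y) ∈ pvBoxL l1 l2 := by
  unfold pvBoxL
  simp only [List.mem_flatMap, List.mem_map, List.mem_range]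
  exact ⟨x, by omega, y, by omega, rfl⟩

def pvU (l1 l2 : Nat) (m : PySem.Dict (Nat × Nat) (List Char)) : Nat :=
  (pvBoxL l1 l2).countP (fun k => (m.get? k).isNone)

def pvRank : List (Nat × Nat) → Nat
  | [] => 0
  | e :: _ => e.1 + e.2

theorem pvLoopB_nil (cs1 cs2 : List Char) (f : Nat) (m : PySem.Dict (Nat × Nat) (List Char)) :
    pvLoopB cs1 cs2 f [] m = m := by
  cases f <;> rw [pvLoopB]

theorem pvLoopB_step_some (cs1 cs2 : List Char) (fuel i j : Nat) (rest : List (Nat × Nat))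
    (m : PySem.Dict (Nat × Nat) (List Char)) (p : Nat × Nat)
    (hij : ¬ (i = 0 ∨ j = 0))
    (hfind : ((i-1, j) :: (i, j-1) ::
        (if cs1.getD (i-1) ' ' = cs2.getD (j-1) ' ' then [(i-1, j-1)] else [])).find?
        (fun p => decide (0 < p.1) && decide (0 < p.2) && (m.get? p).isNone) = some p) :
    pvLoopB cs1 cs2 (fuel+1) ((i, j) :: rest) m = pvLoopB cs1 cs2 fuel (p :: (i, j) :: rest) m := by
  rw [pvLoopB, if_neg hij, hfind]

theorem pvLoopB_step_none (cs1 cs2 : List Char) (fuel i j : Nat) (rest : List (Nat × Nat))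
    (m : PySem.Dict (Nat × Nat) (List Char))
    (hij : ¬ (i = 0 ∨ j = 0))
    (hfind : ((i-1, j) :: (i, j-1) ::
        (if cs1.getD (i-1) ' ' = cs2.getD (j-1) ' ' then [(i-1, j-1)] else [])).find?
        (fun p => decide (0 < p.1) && decide (0 < p.2) && (m.get? p).isNone) = none) :
    pvLoopB cs1 cs2 (fuel+1) ((i, j) :: rest) m = pvLoopB cs1 cs2 fuel rest (m.insert (i, j)
      (if cs1.getD (i-1) ' ' = cs2.getD (j-1) ' '
       then max (max (m.getD (i-1, j) []) (m.getD (i, j-1) []))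
            (m.getD (i-1, j-1) [] ++ [cs1.getD (i-1) ' '])
       else max (m.getD (i-1, j) []) (m.getD (i, j-1) []))) := by
  rw [pvLoopB, if_neg hij, hfind]

theorem pv_countP_insert_le (m : PySem.Dict (Nat × Nat) (List Char)) (k : Nat × Nat)
    (v : List Char) (l : List (Nat × Nat)) :
    l.countP (fun p => ((m.insert k v).get? p).isNone)
      ≤ l.countP (fun p => (m.get? p).isNone) := by
  apply List.countP_mono_left
  intro a _ ha
  by_cases hak : a = k
  · rw [hak, PySem.Dict.get?_insert_self] at ha; simp at ha
  · rwa [PySem.Dict.get?_insert_of_ne m v hak] at ha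

theorem pv_countP_insert_lt (m : PySem.Dict (Nat × Nat) (List Char)) (k : Nat × Nat)
    (v : List Char) (l : List (Nat × Nat)) (hk : k ∈ l) (hnone : m.get? k = none) :
    l.countP (fun p => ((m.insert k v).get? p).isNone) + 1
      ≤ l.countP (fun p => (m.get? p).isNone) := by
  induction l with
  | nil => simp at hk
  | cons a t ih =>
    rw [List.countP_cons, List.countP_cons]
    by_cases hak : a = k
    · subst hak
      have h1 : (((m.insert a v).get? a).isNone = true) = False := by
        rw [PySem.Dict.get?_insert_self]; simp
      have h2 : ((m.get? a).isNone = true) = True := by rw [hnone]; simp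
      simp only [h1, h2, if_false, if_true]
      have := pv_countP_insert_le m a v t
      omega
    · have hk' : k ∈ t := by
        cases List.mem_cons.mp hk with
        | inl h => exact absurd h.symm hak
        | inr h => exact h
      have h1 : ((m.insert k v).get? a).isNone = (m.get? a).isNone := by
        rw [PySem.Dict.get?_insert_of_ne m v hak]
      rw [h1]
      have := ih hk'
      omega

theorem pv_getD_dep (cs1 cs2 : List Char) (m : PySem.Dict (Nat × Nat) (List Char))
    (hcons : ∀ k v, m.get? k = some v → v = pvDp cs1 cs2 k.1 k.2)
    (x y : Nat) (hz : m.get? (x, y) = none → x = 0 ∨ y = 0) :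
    m.getD (x, y) [] = pvDp cs1 cs2 x y := by
  cases h : m.get? (x, y) with
  | some v =>
    rw [PySem.Dict.getD_of_get?_eq_some m [] h]
    exact hcons (x, y) v h
  | none =>
    rw [PySem.Dict.getD_of_get?_eq_none m [] h]
    cases hz h with
    | inl h0 => rw [h0, pvDp_zero_left]
    | inr h0 => rw [h0, pvDp_zero_right]

theorem pv_loopB_run (cs1 cs2 : List Char) :
    ∀ (fuel : Nat) (S : List (Nat × Nat)) (m : PySem.Dict (Nat × Nat) (List Char)),
      (∀ k v, m.get? k = some v → v = pvDp cs1 cs2 k.1 k.2) →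
      (∀ e ∈ S, 1 ≤ e.1 ∧ e.1 ≤ cs1.length ∧ 1 ≤ e.2 ∧ e.2 ≤ cs2.length ∧ m.get? e = none) →
      S.Pairwise (fun a b => a.1 + a.2 < b.1 + b.2) →
      pvU cs1.length cs2.length m * (cs1.length + cs2.length + 2) + pvRank S ≤ fuel →
      (∀ k v, m.get? k = some v → (pvLoopB cs1 cs2 fuel S m).get? k = some v) ∧
      (∀ e ∈ S, (pvLoopB cs1 cs2 fuel S m).get? e = some (pvDp cs1 cs2 e.1 e.2)) := by
  intro fuel
  induction fuel with
  | zero =>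
    intro S m hcons hstk _hpw hmeas
    cases S with
    | nil =>
      refine ⟨fun k v h => ?_, fun e he => absurd he List.not_mem_nil⟩
      rw [pvLoopB]; exact h
    | cons e rest =>
      exfalso
      obtain ⟨h1, h2, h3, h4, h5⟩ := hstk e List.mem_cons_self
      have hmem : e ∈ pvBoxL cs1.length cs2.length := by
        obtain ⟨x, y⟩ := e
        exact pv_mem_box _ _ _ _ h2 h4
      have hpos : 0 < pvU cs1.length cs2.length m := by
        unfold pvU
        rw [List.countP_pos_iff]
        exact ⟨e, hmem, by simp [h5]⟩
      have : 1 * (cs1.length + cs2.length + 2) ≤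
          pvU cs1.length cs2.length m * (cs1.length + cs2.length + 2) :=
        Nat.mul_le_mul_right _ hpos
      omega
  | succ fuel ih =>
    intro S m hcons hstk hpw hmeas
    cases S with
    | nil =>
      refine ⟨fun k v h => ?_, fun e he => absurd he List.not_mem_nil⟩
      rw [pvLoopB]; exact h
    | cons top rest =>
      obtain ⟨i, j⟩ := top
      obtain ⟨hi1, hi2, hj1, hj2, hnone⟩ := hstk (i, j) List.mem_cons_self
      have hij : ¬ (i = 0 ∨ j = 0) := by omega
      have hneed_mem : ∀ p ∈ ((i-1, j) :: (i, j-1) ::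
          (if cs1.getD (i-1) ' ' = cs2.getD (j-1) ' ' then [(i-1, j-1)] else [])),
          p = (i-1, j) ∨ p = (i, j-1) ∨ p = (i-1, j-1) := by
        intro p hp
        rcases List.mem_cons.mp hp with h | hp
        · exact Or.inl h
        rcases List.mem_cons.mp hp with h | hp
        · exact Or.inr (Or.inl h)
        · split at hp
          · rw [List.mem_singleton] at hp; exact Or.inr (Or.inr hp)
          · exact absurd hp List.not_mem_nil
      cases hfind : ((i-1, j) :: (i, j-1) ::
          (if cs1.getD (i-1) ' ' = cs2.getD (j-1) ' ' then [(i-1, j-1)] else [])).find?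
          (fun p => decide (0 < p.1) && decide (0 < p.2) && (m.get? p).isNone) with
      | some p =>
        rw [pvLoopB_step_some cs1 cs2 fuel i j rest m p hij hfind]
        have hpmem := List.mem_of_find?_eq_some hfind
        have hppred := List.find?_some hfind
        simp only [Bool.and_eq_true, decide_eq_true_eq, Option.isNone_iff_eq_none] at hppred
        obtain ⟨⟨hp1, hp2⟩, hp3⟩ := hppred
        have hprops : p.1 + p.2 + 1 ≤ i + j ∧ p.1 ≤ cs1.length ∧ p.2 ≤ cs2.length := by
          rcases hneed_mem p hpmem with h | h | h <;> rw [h] <;> simp <;> omega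
        obtain ⟨hprank, hpb1, hpb2⟩ := hprops
        have hstk' : ∀ e ∈ p :: (i, j) :: rest,
            1 ≤ e.1 ∧ e.1 ≤ cs1.length ∧ 1 ≤ e.2 ∧ e.2 ≤ cs2.length ∧ m.get? e = none := by
          intro e he
          rcases List.mem_cons.mp he with h | h
          · rw [h]; exact ⟨hp1, hpb1, hp2, hpb2, hp3⟩
          · exact hstk e h
        have hpw' : (p :: (i, j) :: rest).Pairwise (fun a b => a.1 + a.2 < b.1 + b.2) := by
          refine List.Pairwise.cons ?_ hpw
          intro b hb
          rcases List.mem_cons.mp hb with h | h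
          · rw [h]; omega
          · have := (List.pairwise_cons.mp hpw).1 b h
            omega
        have hmeas' : pvU cs1.length cs2.length m * (cs1.length + cs2.length + 2)
            + pvRank (p :: (i, j) :: rest) ≤ fuel := by
          have ha : pvRank (p :: (i, j) :: rest) = p.1 + p.2 := rfl
          have hb : pvRank ((i, j) :: rest) = i + j := rfl
          rw [ha]; rw [hb] at hmeas; omega
        obtain ⟨c1, c2⟩ := ih (p :: (i, j) :: rest) m hcons hstk' hpw' hmeas'
        exact ⟨c1, fun e he => c2 e (List.mem_cons_of_mem p he)⟩
      | none =>
        rw [pvLoopB_step_none cs1 cs2 fuel i j rest m hij hfind]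
        have hall := List.find?_eq_none.mp hfind
        -- every needed dependency is either a border cell or already memoized
        have hdep : ∀ p, (p = (i-1, j) ∨ p = (i, j-1)) ∨
              (cs1.getD (i-1) ' ' = cs2.getD (j-1) ' ' ∧ p = (i-1, j-1)) →
            m.get? p = none → p.1 = 0 ∨ p.2 = 0 := by
          intro p hp hpn
          have hpm : p ∈ ((i-1, j) :: (i, j-1) ::
              (if cs1.getD (i-1) ' ' = cs2.getD (j-1) ' ' then [(i-1, j-1)] else [])) := by
            rcases hp with (h | h) | ⟨hc, h⟩
            · rw [h]; exact List.mem_cons_self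
            · rw [h]; exact List.mem_cons_of_mem _ List.mem_cons_self
            · rw [h, if_pos hc]
              exact List.mem_cons_of_mem _ (List.mem_cons_of_mem _ List.mem_cons_self)
          by_contra hc
          push Not at hc
          have hfalse := hall p hpm
          rw [hpn] at hfalse
          simp at hfalse
          omega
        obtain ⟨i', rfl⟩ : ∃ i', i = i' + 1 := ⟨i - 1, by omega⟩
        obtain ⟨j', rfl⟩ : ∃ j', j = j' + 1 := ⟨j - 1, by omega⟩
        simp only [Nat.add_sub_cancel] at hdep hall ⊢
        have hup : m.getD (i', j' + 1) [] = pvDp cs1 cs2 i' (j' + 1) :=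
          pv_getD_dep cs1 cs2 m hcons i' (j' + 1)
            (fun h => hdep (i', j' + 1) (Or.inl (Or.inl (by simp))) h)
        have hleft : m.getD (i' + 1, j') [] = pvDp cs1 cs2 (i' + 1) j' :=
          pv_getD_dep cs1 cs2 m hcons (i' + 1) j'
            (fun h => hdep (i' + 1, j') (Or.inl (Or.inr (by simp))) h)
        have hval : (if cs1.getD i' ' ' = cs2.getD j' ' '
             then max (max (m.getD (i', j' + 1) []) (m.getD (i' + 1, j') []))
                  (m.getD (i', j') [] ++ [cs1.getD i' ' '])
             else max (m.getD (i', j' + 1) []) (m.getD (i' + 1, j') []))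
            = pvDp cs1 cs2 (i' + 1) (j' + 1) := by
          rw [pvDp_succ_succ, hup, hleft]
          by_cases heq : cs1.getD i' ' ' = cs2.getD j' ' '
          · rw [if_pos heq, if_pos heq]
            have hdiag : m.getD (i', j') [] = pvDp cs1 cs2 i' j' :=
              pv_getD_dep cs1 cs2 m hcons i' j'
                (fun h => hdep (i', j') (Or.inr ⟨heq, by simp⟩) h)
            rw [hdiag]
          · rw [if_neg heq, if_neg heq]
        rw [hval]
        set m' := m.insert (i' + 1, j' + 1) (pvDp cs1 cs2 (i' + 1) (j' + 1)) with hm'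
        have hcons' : ∀ k v, m'.get? k = some v → v = pvDp cs1 cs2 k.1 k.2 := by
          intro k v h
          rw [hm', PySem.Dict.get?_insert] at h
          split at h
          · rename_i hk
            rw [hk]
            injection h with h; rw [← h]
          · exact hcons k v h
        have hrestne : ∀ e ∈ rest, e ≠ (i' + 1, j' + 1) := by
          intro e he hcontra
          have := (List.pairwise_cons.mp hpw).1 e he
          rw [hcontra] at this
          omega
        have hstk' : ∀ e ∈ rest,
            1 ≤ e.1 ∧ e.1 ≤ cs1.length ∧ 1 ≤ e.2 ∧ e.2 ≤ cs2.length ∧ m'.get? e = none := by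
          intro e he
          obtain ⟨a1, a2, a3, a4, a5⟩ := hstk e (List.mem_cons_of_mem _ he)
          refine ⟨a1, a2, a3, a4, ?_⟩
          rw [hm', PySem.Dict.get?_insert, if_neg (hrestne e he)]
          exact a5
        have hpw' := (List.pairwise_cons.mp hpw).2
        have hUlt : pvU cs1.length cs2.length m' + 1 ≤ pvU cs1.length cs2.length m := by
          unfold pvU
          rw [hm']
          exact pv_countP_insert_lt m (i' + 1, j' + 1) _ _
            (pv_mem_box _ _ _ _ hi2 hj2) hnone
        have hrk : pvRank rest ≤ cs1.length + cs2.length := by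
          cases rest with
          | nil => simp [pvRank]
          | cons e t =>
            obtain ⟨a1, a2, a3, a4, _⟩ := hstk e (List.mem_cons_of_mem _ List.mem_cons_self)
            show e.1 + e.2 ≤ _
            omega
        have hmeas' : pvU cs1.length cs2.length m' * (cs1.length + cs2.length + 2)
            + pvRank rest ≤ fuel := by
          have hkey : pvU cs1.length cs2.length m' * (cs1.length + cs2.length + 2)
              + (cs1.length + cs2.length + 2)
              ≤ pvU cs1.length cs2.length m * (cs1.length + cs2.length + 2) := by
            have hmul := Nat.mul_le_mul_right (cs1.length + cs2.length + 2) hUlt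
            rw [Nat.add_mul, one_mul] at hmul
            exact hmul
          have htoprank : pvRank ((i' + 1, j' + 1) :: rest) = i' + 1 + (j' + 1) := rfl
          rw [htoprank] at hmeas
          set a := pvU cs1.length cs2.length m' * (cs1.length + cs2.length + 2)
          set b := pvU cs1.length cs2.length m * (cs1.length + cs2.length + 2)
          omega
        obtain ⟨c1, c2⟩ := ih rest m' hcons' hstk' hpw' hmeas'
        constructor
        · intro k v h
          apply c1
          rw [hm', PySem.Dict.get?_insert]
          split
          · rename_i hk
            rw [hk, hnone] at h
            exact absurd h (by simp)
          · exact h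
        · intro e he
          rcases List.mem_cons.mp he with h | h
          · rw [h]
            apply c1
            rw [hm', PySem.Dict.get?_insert_self]
          · exact c2 e h

theorem pv_B_eq (s1 s2 : String) :
    lcs_string_alt s1 s2 = String.ofList (pvDp s1.toList s2.toList s1.toList.length s2.toList.length) := by
  simp only [lcs_string_alt]
  set cs1 := s1.toList
  set cs2 := s2.toList
  set l1 := cs1.length
  set l2 := cs2.length
  by_cases hz : l1 = 0 ∨ l2 = 0
  · -- the single stack entry is a border cell: popped at once, memo stays empty
    have hfuel : ((l1+1)*(l2+1)+1)*(l1+l2+2) = ((l1+1)*(l2+1)+1)*(l1+l2+2) - 1 + 1 := by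
      have h2 : 2 ≤ ((l1+1)*(l2+1)+1)*(l1+l2+2) := by
        calc 2 = 1 * 2 := rfl
          _ ≤ ((l1+1)*(l2+1)+1)*(l1+l2+2) := Nat.mul_le_mul (by omega) (by omega)
      omega
    rw [hfuel, pvLoopB, if_pos hz, pvLoopB_nil]
    rw [PySem.Dict.getD_of_get?_eq_none _ _ (PySem.Dict.get?_empty _)]
    rcases hz with h | h
    · rw [h, pvDp_zero_left]
    · rw [h, pvDp_zero_right]
  · push Not at hz
    obtain ⟨h1, h2⟩ := hz
    have hrun := pv_loopB_run cs1 cs2 (((l1+1)*(l2+1)+1)*(l1+l2+2)) [(l1, l2)] PySem.Dict.empty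
      (fun k v h => absurd h (by rw [PySem.Dict.get?_empty]; simp))
      (fun e he => by
        rw [List.mem_singleton] at he
        rw [he]
        exact ⟨by omega, le_refl _, by omega, le_refl _, PySem.Dict.get?_empty _⟩)
      (List.pairwise_singleton _ _)
      (by
        have hUle : pvU l1 l2 PySem.Dict.empty ≤ (l1+1)*(l2+1) := by
          have hlen : (pvBoxL l1 l2).length = (l1+1)*(l2+1) := by
            unfold pvBoxL
            rw [List.length_flatMap]
            simp
          calc pvU l1 l2 PySem.Dict.empty ≤ (pvBoxL l1 l2).length := List.countP_le_length
            _ = (l1+1)*(l2+1) := hlen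
        have hrank : pvRank [(l1, l2)] = l1 + l2 := rfl
        rw [hrank]
        have hmul := Nat.mul_le_mul_right (l1+l2+2) hUle
        rw [Nat.add_mul, one_mul]
        set a := pvU l1 l2 PySem.Dict.empty * (l1+l2+2)
        set b := (l1+1)*(l2+1)*(l1+l2+2)
        omega)
    have hget := hrun.2 (l1, l2) (List.mem_singleton.mpr rfl)
    rw [PySem.Dict.getD_of_get?_eq_some _ _ hget]

-- ===== VERDICT (by name: the statement is the Claim_ definition above) =====
theorem lcs_string_spec : Claim_equal_lcs_string := by
  intro s1 s2 _
  unfold Spec_lcs_string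
  rw [pv_A_eq, pv_B_eq]
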